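-- pv_equiv track=rewrite | github.com/zetr1x/VVPD_5 | main.py | integral_view
-- ===== SOURCE A (Python) =====
-- def integral_view(image: list) -> list:
--     """
--     Функция расчитывает матрицу интегрального представления изображения
--
--     Args:
--         image: матрица пикселей изображения
--
--     Returns:
--         integral_image: интегральное представление изображения
--     """
--     height = len(image)
--     width = len(image[0])
--     integral_image = [[0] * width for _ in range(height)]
--     for x in range(width):
--         for y in range(height):
--             value_1 = image[y][x]
--             value_2 = integral_image[y - 1][x - 1] if y > 0 and x > 0 else 0
--             value_3 = integral_image[y][x - 1] if x > 0 else 0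
--             value_4 = integral_image[y - 1][x] if y > 0 else 0
--             integral_image[y][x] = value_1 + value_4 + value_3 - value_2
--     return integral_image
-- ===== SOURCE B (Python) =====
-- def integral_view(image: list) -> list:
--     """Summed-area table via a single row-major pass: running row sum plus the row above."""
--     width = len(image[0])
--     integral_image = []
--     prev = [0] * width
--     for row in image:
--         running = 0
--         new_row = []
--         for x in range(width):
--             running += row[x]
--             new_row.append(running + prev[x])
--         integral_image.append(new_row)
--         prev = new_row
--     return integral_image
-- ===== Notes on version B (the rewrite author's own statement) =====
-- stated objective: faster
-- what changed: Replaces A's column-major in-place fill using the 4-term SAT recurrence (four indexed reads and one indexed write per cell) with a single row-major pass keeping a running row sum and the previously produced row, appending cells in order.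
import Mathlib
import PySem

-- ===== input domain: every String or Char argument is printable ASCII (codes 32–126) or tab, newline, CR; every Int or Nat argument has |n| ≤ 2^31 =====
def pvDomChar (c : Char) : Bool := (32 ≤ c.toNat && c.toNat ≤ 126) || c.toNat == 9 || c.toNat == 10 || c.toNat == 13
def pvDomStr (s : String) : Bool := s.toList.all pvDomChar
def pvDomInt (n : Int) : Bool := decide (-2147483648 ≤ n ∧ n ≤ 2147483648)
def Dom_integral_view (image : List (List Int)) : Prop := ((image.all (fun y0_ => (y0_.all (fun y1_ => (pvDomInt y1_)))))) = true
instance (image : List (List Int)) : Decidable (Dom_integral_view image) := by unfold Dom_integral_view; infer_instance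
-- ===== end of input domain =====

-- B replaces A's column-major in-place fill via the 4-term summed-area recurrence with a single
-- row-major pass (running row sum plus the previously produced row); same O(h*w) cost.

-- ===== PORT A =====
-- getD is the value Python's indexing yields on every input Pre_ admits (all indices are in range there).
def integral_view (image : List (List Int)) : List (List Int) :=
  let height := image.length
  let width := (image.getD 0 []).length
  let init := List.replicate height (List.replicate width (0 : Int))
  (List.range width).foldl (fun M x =>
    (List.range height).foldl (fun (M : List (List Int)) (y : Nat) =>
      let value1 := (image.getD y []).getD x 0
      let value2 := if 0 < y ∧ 0 < x then (M.getD (y-1) []).getD (x-1) 0 else 0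
      let value3 := if 0 < x then (M.getD y []).getD (x-1) 0 else 0
      let value4 := if 0 < y then (M.getD (y-1) []).getD x 0 else 0
      M.set y ((M.getD y []).set x (value1 + value4 + value3 - value2))) M) init

-- ===== PORT B =====
def integral_view_alt (image : List (List Int)) : List (List Int) :=
  let width := (image.getD 0 []).length
  (image.foldl (fun (st : List Int × List (List Int)) row =>
      let inner := (List.range width).foldl
        (fun (p : Int × List Int) x =>
          let running := p.1 + row.getD x 0
          (running, p.2 ++ [running + st.1.getD x 0]))
        ((0 : Int), ([] : List Int))
      (inner.2, st.2 ++ [inner.2]))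
    (List.replicate width (0 : Int), ([] : List (List Int)))).2

-- ===== PRECONDITION & SPEC =====
-- Pre_ excludes exactly the inputs where the Python A raises IndexError: the empty image
-- (image[0]) and ragged images having a row shorter than the first row (image[y][x]).
def Pre_integral_view (image : List (List Int)) : Prop :=
  image ≠ [] ∧ ∀ row ∈ image, (image.getD 0 []).length ≤ row.length
instance (image : List (List Int)) : Decidable (Pre_integral_view image) := by
  unfold Pre_integral_view; infer_instance

def pvWitness_integral_view : List (List Int) := [[1, 2], [3, 4]]

def Spec_integral_view (image : List (List Int)) (out : List (List Int)) : Prop := out = integral_view_alt image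
instance (image : List (List Int)) (out : List (List Int)) : Decidable (Spec_integral_view image out) := by unfold Spec_integral_view; infer_instance

-- ===== CLAIM (what is proved, stated in full; the proofs are below) =====
def Claim_equal_integral_view : Prop := ∀ (image : List (List Int)), Dom_integral_view image → Pre_integral_view image → Spec_integral_view image (integral_view image)

-- ===== LEMMAS AND PROOFS =====

-- the (defaulted) pixel read; equals the Python read wherever Python reads
def pvPix (image : List (List Int)) (y x : Nat) : Int := (image.getD y []).getD x 0

-- summed-area value: sum of pixels (i,j) with i ≤ y, j ≤ x
def pvCell (image : List (List Int)) (y x : Nat) : Int :=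
  ∑ i ∈ Finset.range (y+1), ∑ j ∈ Finset.range (x+1), pvPix image i j

-- row-prefix sum
def pvRowPref (row : List Int) (x : Nat) : Int := ∑ j ∈ Finset.range (x+1), row.getD j 0

theorem getD_map_range' {α : Type} (n i : Nat) (f : Nat → α) (d : α) :
    ((List.range n).map f).getD i d = if i < n then f i else d := by
  rcases Nat.lt_or_ge i n with h | h
  · rw [List.getD_eq_getElem _ _ (by simpa using h)]; simp [h]
  · rw [List.getD_eq_default _ _ (by simpa using h)]; simp [Nat.not_lt.2 h]

theorem set_map_range {α : Type} (n i : Nat) (f : Nat → α) (v : α) :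
    ((List.range n).map f).set i v = (List.range n).map (fun j => if j = i then v else f j) := by
  apply List.ext_getElem
  · simp
  · intro k h1 h2
    simp only [List.getElem_set, List.getElem_map, List.getElem_range]
    by_cases hk : k = i
    · simp [hk]
    · rw [if_neg (fun h : i = k => hk h.symm)]; simp [hk]

-- inclusion–exclusion recurrence for pvCell (A's 4-term update writes exactly this)
theorem pvCell_rec (image : List (List Int)) (y x : Nat) :
    pvCell image y x = pvPix image y x
      + (if 0 < y then pvCell image (y-1) x else 0)
      + (if 0 < x then pvCell image y (x-1) else 0)
      - (if 0 < y ∧ 0 < x then pvCell image (y-1) (x-1) else 0) := by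
  rcases y with _ | s <;> rcases x with _ | t
  · simp [pvCell]
  · simp [pvCell, Finset.sum_range_succ]; ring
  · simp [pvCell, Finset.sum_range_succ]; ring
  · simp only [pvCell, Nat.add_sub_cancel, Nat.zero_lt_succ, if_true, and_self]
    have e1 : (∑ i ∈ Finset.range (s+1+1), ∑ j ∈ Finset.range (t+1+1), pvPix image i j)
        = (∑ i ∈ Finset.range (s+1), ∑ j ∈ Finset.range (t+1+1), pvPix image i j)
          + (∑ j ∈ Finset.range (t+1), pvPix image (s+1) j) + pvPix image (s+1) (t+1) := by
      rw [Finset.sum_range_succ, Finset.sum_range_succ (f := fun j => pvPix image (s+1) j)]; ring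
    have e2 : ∀ u : Nat, (∑ i ∈ Finset.range u, ∑ j ∈ Finset.range (t+1+1), pvPix image i j)
        = (∑ i ∈ Finset.range u, ∑ j ∈ Finset.range (t+1), pvPix image i j)
          + (∑ i ∈ Finset.range u, pvPix image i (t+1)) := by
      intro u
      rw [← Finset.sum_add_distrib]
      exact Finset.sum_congr rfl (fun i _ => Finset.sum_range_succ _ _)
    have e3 : (∑ i ∈ Finset.range (s+1+1), ∑ j ∈ Finset.range (t+1), pvPix image i j)
        = (∑ i ∈ Finset.range (s+1), ∑ j ∈ Finset.range (t+1), pvPix image i j)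
          + (∑ j ∈ Finset.range (t+1), pvPix image (s+1) j) := Finset.sum_range_succ _ _
    rw [e1, e2, e3]; ring

-- ===== B side =====

theorem alt_inner (row prev : List Int) (w : Nat) :
    (List.range w).foldl
      (fun (p : Int × List Int) x =>
        let running := p.1 + row.getD x 0
        (running, p.2 ++ [running + prev.getD x 0]))
      ((0 : Int), ([] : List Int))
    = (∑ j ∈ Finset.range w, row.getD j 0,
       (List.range w).map (fun x => pvRowPref row x + prev.getD x 0)) := by
  induction w with
  | zero => simp
  | succ n ih =>
    rw [List.range_succ, List.foldl_append, List.map_append, ih]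
    simp [pvRowPref, Finset.sum_range_succ]

theorem alt_fold (w : Nat) :
    ∀ (rows : List (List Int)) (prev : List Int) (acc : List (List Int)),
    (rows.foldl (fun (st : List Int × List (List Int)) row =>
        let inner := (List.range w).foldl
          (fun (p : Int × List Int) x =>
            let running := p.1 + row.getD x 0
            (running, p.2 ++ [running + st.1.getD x 0]))
          ((0 : Int), ([] : List Int))
        (inner.2, st.2 ++ [inner.2])) (prev, acc)).2
    = acc ++ (List.range rows.length).map (fun k =>
        (List.range w).map (fun x => prev.getD x 0 + ∑ i ∈ Finset.range (k+1), pvRowPref (rows.getD i []) x)) := by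
  intro rows
  induction rows with
  | nil => simp
  | cons r rest ih =>
    intro prev acc
    simp only [List.foldl_cons]
    rw [alt_inner, ih]
    rw [List.length_cons, List.range_succ_eq_map, List.map_cons, List.map_map]
    have h1 : (List.map (fun x => pvRowPref r x + prev.getD x 0) (List.range w))
        = List.map (fun x => prev.getD x 0 + ∑ i ∈ Finset.range (0+1), pvRowPref ((r :: rest).getD i []) x) (List.range w) := by
      apply List.map_congr_left
      intro x _
      simp [add_comm]
    have h2 : List.map ((fun k => List.map (fun x => prev.getD x 0 + ∑ i ∈ Finset.range (k+1), pvRowPref ((r :: rest).getD i []) x) (List.range w)) ∘ Nat.succ) (List.range rest.length)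
        = List.map (fun k => List.map (fun x => ((List.map (fun x => pvRowPref r x + prev.getD x 0) (List.range w)).getD x 0) + ∑ i ∈ Finset.range (k+1), pvRowPref (rest.getD i []) x) (List.range w)) (List.range rest.length) := by
      apply List.map_congr_left
      intro k _
      simp only [Function.comp]
      apply List.map_congr_left
      intro x hx
      rw [getD_map_range', if_pos (List.mem_range.mp hx)]
      rw [Finset.sum_range_succ']
      simp only [List.getD_cons_succ, List.getD_cons_zero]
      ring
    rw [h2, ← h1]
    simp

theorem alt_closed (image : List (List Int)) :
    integral_view_alt image
    = (List.range image.length).map (fun y =>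
        (List.range (image.getD 0 []).length).map (fun x => pvCell image y x)) := by
  show (image.foldl _ (List.replicate (image.getD 0 []).length (0 : Int), ([] : List (List Int)))).2 = _
  rw [alt_fold (image.getD 0 []).length image (List.replicate (image.getD 0 []).length (0 : Int)) []]
  rw [List.nil_append]
  apply List.map_congr_left
  intro y _
  apply List.map_congr_left
  intro x _
  have hz : (List.replicate (image.getD 0 []).length (0 : Int)).getD x 0 = 0 := by
    rcases Nat.lt_or_ge x (image.getD 0 []).length with h | h
    · rw [List.getD_eq_getElem _ _ (by simpa using h)]; simp
    · rw [List.getD_eq_default _ _ (by simpa using h)]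
  rw [hz, zero_add]
  exact Finset.sum_congr rfl (fun i _ => Finset.sum_congr rfl (fun j _ => rfl))

-- ===== A side =====

-- matrix state after columns < c are done and, in column c, rows < r are done
def pvMk (image : List (List Int)) (h w c r : Nat) : List (List Int) :=
  (List.range h).map (fun y =>
    (List.range w).map (fun x => if x < c ∨ (x = c ∧ y < r) then pvCell image y x else 0))

theorem a_inner_step (image : List (List Int)) (h w c r : Nat) (hc : c < w) (hr : r < h) :
    (fun (M : List (List Int)) (y : Nat) =>
      let value1 := (image.getD y []).getD c 0
      let value2 := if 0 < y ∧ 0 < c then (M.getD (y-1) []).getD (c-1) 0 else 0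
      let value3 := if 0 < c then (M.getD y []).getD (c-1) 0 else 0
      let value4 := if 0 < y then (M.getD (y-1) []).getD c 0 else 0
      M.set y ((M.getD y []).set c (value1 + value4 + value3 - value2))) (pvMk image h w c r) r
    = pvMk image h w c (r+1) := by
  simp only [pvMk]
  have hrow : ∀ y, y < h → ((List.range h).map (fun y =>
      (List.range w).map (fun x => if x < c ∨ (x = c ∧ y < r) then pvCell image y x else 0))).getD y []
      = (List.range w).map (fun x => if x < c ∨ (x = c ∧ y < r) then pvCell image y x else 0) := by
    intro y hy; rw [getD_map_range', if_pos hy]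
  have hval : ∀ y x, y < h → x < w →
      ((List.range w).map (fun x => if x < c ∨ (x = c ∧ y < r) then pvCell image y x else 0)).getD x 0
      = (if x < c ∨ (x = c ∧ y < r) then pvCell image y x else 0) := by
    intro y x _ hx; rw [getD_map_range', if_pos hx]
  have hv2 : (if 0 < r ∧ 0 < c then (((List.range h).map (fun y =>
      (List.range w).map (fun x => if x < c ∨ (x = c ∧ y < r) then pvCell image y x else 0))).getD (r-1) []).getD (c-1) 0 else 0)
      = (if 0 < r ∧ 0 < c then pvCell image (r-1) (c-1) else 0) := by
    by_cases hp : 0 < r ∧ 0 < c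
    · rw [if_pos hp, if_pos hp, hrow _ (by omega), hval _ _ (by omega) (by omega), if_pos (by omega)]
    · rw [if_neg hp, if_neg hp]
  have hv3 : (if 0 < c then (((List.range h).map (fun y =>
      (List.range w).map (fun x => if x < c ∨ (x = c ∧ y < r) then pvCell image y x else 0))).getD r []).getD (c-1) 0 else 0)
      = (if 0 < c then pvCell image r (c-1) else 0) := by
    by_cases hp : 0 < c
    · rw [if_pos hp, if_pos hp, hrow _ hr, hval _ _ hr (by omega), if_pos (by omega)]
    · rw [if_neg hp, if_neg hp]
  have hv4 : (if 0 < r then (((List.range h).map (fun y =>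
      (List.range w).map (fun x => if x < c ∨ (x = c ∧ y < r) then pvCell image y x else 0))).getD (r-1) []).getD c 0 else 0)
      = (if 0 < r then pvCell image (r-1) c else 0) := by
    by_cases hp : 0 < r
    · rw [if_pos hp, if_pos hp, hrow _ (by omega), hval _ _ (by omega) hc, if_pos (by omega)]
    · rw [if_neg hp, if_neg hp]
  rw [hv2, hv3, hv4, hrow r hr]
  have hnew : (image.getD r []).getD c 0
      + (if 0 < r then pvCell image (r-1) c else 0)
      + (if 0 < c then pvCell image r (c-1) else 0)
      - (if 0 < r ∧ 0 < c then pvCell image (r-1) (c-1) else 0) = pvCell image r c :=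
    (pvCell_rec image r c).symm
  rw [hnew, set_map_range, set_map_range]
  apply List.map_congr_left
  intro y hy
  by_cases hyr : y = r
  · subst hyr
    rw [if_pos rfl]
    apply List.map_congr_left
    intro x hx
    by_cases hxc : x = c
    · subst hxc; rw [if_pos rfl, if_pos (by omega)]
    · rw [if_neg hxc]
      by_cases h1 : x < c
      · rw [if_pos (by omega), if_pos (by omega)]
      · rw [if_neg (by omega), if_neg (by omega)]
  · rw [if_neg hyr]
    apply List.map_congr_left
    intro x hx
    by_cases hp : x < c ∨ (x = c ∧ y < r)
    · rw [if_pos hp, if_pos (by rcases hp with h | h; exact Or.inl h; exact Or.inr ⟨h.1, by omega⟩)]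
    · rw [if_neg hp, if_neg (by rintro (h | h); exact hp (Or.inl h); exact hp (Or.inr ⟨h.1, by omega⟩))]

theorem a_inner (image : List (List Int)) (h w c : Nat) (hc : c < w) :
    ∀ r, r ≤ h → (List.range r).foldl (fun (M : List (List Int)) (y : Nat) =>
      let value1 := (image.getD y []).getD c 0
      let value2 := if 0 < y ∧ 0 < c then (M.getD (y-1) []).getD (c-1) 0 else 0
      let value3 := if 0 < c then (M.getD y []).getD (c-1) 0 else 0
      let value4 := if 0 < y then (M.getD (y-1) []).getD c 0 else 0
      M.set y ((M.getD y []).set c (value1 + value4 + value3 - value2))) (pvMk image h w c 0)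
    = pvMk image h w c r := by
  intro r
  induction r with
  | zero => intro _; simp
  | succ n ih =>
    intro hn
    rw [List.range_succ, List.foldl_append, ih (by omega), List.foldl_cons, List.foldl_nil]
    exact a_inner_step image h w c n hc (by omega)

theorem pvMk_succ_zero (image : List (List Int)) (h w c : Nat) :
    pvMk image h w c h = pvMk image h w (c+1) 0 := by
  apply List.map_congr_left
  intro y hy
  apply List.map_congr_left
  intro x _
  have hyh := List.mem_range.mp hy
  by_cases hp : x < c ∨ (x = c ∧ y < h)
  · rw [if_pos hp, if_pos (by omega)]
  · rw [if_neg hp, if_neg (by omega)]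

theorem a_outer (image : List (List Int)) (h w : Nat) :
    ∀ c, c ≤ w → (List.range c).foldl (fun M x =>
      (List.range h).foldl (fun (M : List (List Int)) (y : Nat) =>
        let value1 := (image.getD y []).getD x 0
        let value2 := if 0 < y ∧ 0 < x then (M.getD (y-1) []).getD (x-1) 0 else 0
        let value3 := if 0 < x then (M.getD y []).getD (x-1) 0 else 0
        let value4 := if 0 < y then (M.getD (y-1) []).getD x 0 else 0
        M.set y ((M.getD y []).set x (value1 + value4 + value3 - value2))) M) (pvMk image h w 0 0)
    = pvMk image h w c 0 := by
  intro c
  induction c with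
  | zero => intro _; simp
  | succ n ih =>
    intro hn
    rw [List.range_succ, List.foldl_append, ih (by omega), List.foldl_cons, List.foldl_nil]
    rw [a_inner image h w n (by omega) h (le_refl h)]
    exact pvMk_succ_zero image h w n

theorem a_closed (image : List (List Int)) :
    integral_view image
    = (List.range image.length).map (fun y =>
        (List.range (image.getD 0 []).length).map (fun x => pvCell image y x)) := by
  have hinit : List.replicate image.length (List.replicate (image.getD 0 []).length (0 : Int))
      = pvMk image image.length (image.getD 0 []).length 0 0 := by
    rw [show ∀ (n : Nat) (a : List Int), List.replicate n a = (List.range n).map (fun _ => a) by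
      intro n a; rw [List.map_const', List.length_range]]
    apply List.map_congr_left
    intro y _
    rw [show ∀ (n : Nat), List.replicate n (0:Int) = (List.range n).map (fun _ => (0:Int)) by
      intro n; rw [List.map_const', List.length_range]]
    apply List.map_congr_left
    intro x _
    rw [if_neg (by omega)]
  show (List.range (image.getD 0 []).length).foldl _ (List.replicate image.length (List.replicate (image.getD 0 []).length (0 : Int))) = _
  rw [hinit, a_outer image image.length (image.getD 0 []).length (image.getD 0 []).length (le_refl _)]
  apply List.map_congr_left
  intro y _
  apply List.map_congr_left
  intro x hx
  rw [if_pos (Or.inl (List.mem_range.mp hx))]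

-- ===== VERDICT (by name: the statement is the Claim_ definition above) =====
theorem integral_view_spec : Claim_equal_integral_view := by
  intro image _ _
  unfold Spec_integral_view
  rw [a_closed, alt_closed]
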